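-- pv_equiv track=rewrite | github.com/Fabrice2000/project-m-t-o-flask- | group5-py-app/app/condorcet.py | compute_margin_matrix
-- ===== SOURCE A (Python) =====
-- from typing import List, Dict, Optional, Tuple, Set
--
-- def compute_margin_matrix(pairwise_matrix: Dict[int, Dict[int, int]],
--                         candidates: List[int]) -> Dict[int, Dict[int, int]]:
--     """
--     Calcule la matrice des marges de victoire
--
--     Args:
--         pairwise_matrix: Matrice des comparaisons par paires
--         candidates: Liste des candidats
--
--     Returns:
--         Matrice où margin[a][b] = votes_for_a - votes_for_b
--     """
--     margin_matrix = {}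
--
--     for a in candidates:
--         margin_matrix[a] = {}
--         for b in candidates:
--             if a != b:
--                 votes_a = pairwise_matrix[a].get(b, 0)
--                 votes_b = pairwise_matrix[b].get(a, 0)
--                 margin_matrix[a][b] = votes_a - votes_b
--
--     return margin_matrix
-- ===== SOURCE B (Python) =====
-- def compute_margin_matrix(pairwise_matrix, candidates):
--     # Stage 1: restrict the raw counts to ordered candidate pairs (forward votes only).
--     forward = {a: {b: pairwise_matrix[a].get(b, 0) for b in candidates if b != a}
--                for a in candidates}
--     # Stage 2: zero margin matrix with the same cells.
--     margin = {a: {b: 0 for b in forward[a]} for a in forward}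
--     # Stage 3: one antisymmetric accumulation sweep over forward's cells:
--     # each forward cell (a, b, v) contributes +v to margin[a][b] and -v to margin[b][a].
--     for a, row in forward.items():
--         for b, v in row.items():
--             margin[a][b] += v
--             margin[b][a] -= v
--     return margin
-- ===== Notes on version B (the rewrite author's own statement) =====
-- stated objective: alternative
-- what changed: B replaces A's direct nested fill (two pairwise_matrix lookups per ordered cell) by three staged passes: it first restricts the raw counts to a forward matrix over candidate pairs, then builds a zero matrix, then makes one antisymmetric accumulation sweep over the forward matrix's cells (each cell (a,b,v) does margin[a][b]+=v and margin[b][a]-=v), so the reverse lookup into pairwise_matrix disappears.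
import Mathlib
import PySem

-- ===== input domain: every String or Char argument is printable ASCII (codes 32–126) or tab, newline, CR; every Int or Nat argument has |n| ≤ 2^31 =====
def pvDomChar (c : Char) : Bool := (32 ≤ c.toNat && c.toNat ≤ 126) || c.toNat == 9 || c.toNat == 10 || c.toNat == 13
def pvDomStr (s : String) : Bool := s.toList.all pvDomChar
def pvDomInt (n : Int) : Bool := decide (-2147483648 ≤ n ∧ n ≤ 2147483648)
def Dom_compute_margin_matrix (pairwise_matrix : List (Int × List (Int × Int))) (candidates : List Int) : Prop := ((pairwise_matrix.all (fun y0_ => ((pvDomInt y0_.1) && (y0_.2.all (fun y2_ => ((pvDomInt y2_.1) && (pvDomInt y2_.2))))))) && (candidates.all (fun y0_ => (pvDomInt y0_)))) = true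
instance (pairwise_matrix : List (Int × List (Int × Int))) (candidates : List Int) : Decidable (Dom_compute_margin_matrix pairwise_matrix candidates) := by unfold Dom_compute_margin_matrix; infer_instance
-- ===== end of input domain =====

-- B builds the margin matrix in three staged passes (restrict to a forward matrix, zero matrix,
-- one antisymmetric accumulation sweep over the forward cells) instead of A's direct nested
-- per-cell fill with two raw lookups; alternative decomposition, same exact output.

-- ===== PORT A =====
-- `pairwise_matrix[a]` raises KeyError when `a` is missing; Pre_ excludes exactly those
-- inputs, and `getD _ []` is the total form of that lookup on the admitted inputs.
def compute_margin_matrix (pairwise_matrix : List (Int × List (Int × Int))) (candidates : List Int) : List (Int × List (Int × Int)) :=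
  (candidates.foldl
    (fun m a =>
      candidates.foldl
        (fun m b =>
          if a ≠ b then
            let votes_a := (PySem.Dict.mk ((PySem.Dict.mk pairwise_matrix).getD a [])).getD b 0
            let votes_b := (PySem.Dict.mk ((PySem.Dict.mk pairwise_matrix).getD b [])).getD a 0
            m.modify a PySem.Dict.empty (fun row => row.insert b (votes_a - votes_b))
          else m)
        (m.insert a PySem.Dict.empty))
    (PySem.Dict.empty : PySem.Dict Int (PySem.Dict Int Int))).items.map (fun p => (p.1, p.2.items))

-- ===== PORT B =====
-- `margin[a][b] += v` / `margin[b][a] -= v` index cells that by construction always exist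
-- (both keys are distinct candidates), so `row.getD _ 0` is the exact total form of that read.
def compute_margin_matrix_alt (pairwise_matrix : List (Int × List (Int × Int))) (candidates : List Int) : List (Int × List (Int × Int)) :=
  let forward : PySem.Dict Int (PySem.Dict Int Int) :=
    candidates.foldl
      (fun f a =>
        f.insert a
          (candidates.foldl
            (fun r b =>
              if b ≠ a then
                r.insert b ((PySem.Dict.mk ((PySem.Dict.mk pairwise_matrix).getD a [])).getD b 0)
              else r)
            PySem.Dict.empty))
      PySem.Dict.empty
  let margin0 : PySem.Dict Int (PySem.Dict Int Int) :=
    forward.keys.foldl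
      (fun m a =>
        m.insert a
          ((forward.getD a PySem.Dict.empty).keys.foldl
            (fun r b => r.insert b (0 : Int)) PySem.Dict.empty))
      PySem.Dict.empty
  let margin : PySem.Dict Int (PySem.Dict Int Int) :=
    forward.items.foldl
      (fun m p =>
        p.2.items.foldl
          (fun m q =>
            let m1 := m.modify p.1 PySem.Dict.empty (fun row => row.insert q.1 (row.getD q.1 0 + q.2))
            m1.modify q.1 PySem.Dict.empty (fun row => row.insert p.1 (row.getD p.1 0 - q.2)))
          m)
      margin0
  margin.items.map (fun p => (p.1, p.2.items))

-- ===== PRECONDITION & SPEC =====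
-- Pre_ excludes exactly the inputs where Python A raises KeyError: some candidate with a
-- distinct fellow candidate is missing from pairwise_matrix.
def Pre_compute_margin_matrix (pairwise_matrix : List (Int × List (Int × Int))) (candidates : List Int) : Prop :=
  ∀ a ∈ candidates, ∀ b ∈ candidates, a ≠ b →
    (PySem.Dict.mk pairwise_matrix).contains a = true ∧ (PySem.Dict.mk pairwise_matrix).contains b = true
instance (pairwise_matrix : List (Int × List (Int × Int))) (candidates : List Int) : Decidable (Pre_compute_margin_matrix pairwise_matrix candidates) := by unfold Pre_compute_margin_matrix; infer_instance
def pvWitness_compute_margin_matrix : (List (Int × List (Int × Int))) × List Int :=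
  ([(1, [(2, 3)]), (2, [(1, 1)])], [1, 2])

def Spec_compute_margin_matrix (pairwise_matrix : List (Int × List (Int × Int))) (candidates : List Int) (out : List (Int × List (Int × Int))) : Prop := out = compute_margin_matrix_alt pairwise_matrix candidates
instance (pairwise_matrix : List (Int × List (Int × Int))) (candidates : List Int) (out : List (Int × List (Int × Int))) : Decidable (Spec_compute_margin_matrix pairwise_matrix candidates out) := by unfold Spec_compute_margin_matrix; infer_instance

-- ===== CLAIM (what is proved, stated in full; the proofs are below) =====
def Claim_equal_compute_margin_matrix : Prop := ∀ (pairwise_matrix : List (Int × List (Int × Int))) (candidates : List Int), Dom_compute_margin_matrix pairwise_matrix candidates → Pre_compute_margin_matrix pairwise_matrix candidates → Spec_compute_margin_matrix pairwise_matrix candidates (compute_margin_matrix pairwise_matrix candidates)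

-- ===== LEMMAS AND PROOFS =====

-- the raw forward count both programs read: pairwise_matrix[a].get(b, 0)
def pvV (pm : List (Int × List (Int × Int))) (a b : Int) : Int :=
  (PySem.Dict.mk ((PySem.Dict.mk pm).getD a [])).getD b 0

-- the margin value stored at cell [x][y]
def pvMarg (pm : List (Int × List (Int × Int))) (x y : Int) : Int := pvV pm x y - pvV pm y x

-- a dict tabulating a value function over a key list
def pvTab {ν : Type} (K : List Int) (r : Int → ν) : PySem.Dict Int ν :=
  PySem.Dict.mk (K.map (fun x => (x, r x)))

def pvFullK (dd : List Int) (x : Int) : List Int := dd.filter (fun b => !(b == x))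

-- the final matrix, as a table over dedup'd candidates dd
def pvM (pm : List (Int × List (Int × Int))) (dd : List Int) : PySem.Dict Int (PySem.Dict Int Int) :=
  pvTab dd (fun x => pvTab (pvFullK dd x) (fun y => pvMarg pm x y))

-- B's forward matrix as a table
def pvFwd (pm : List (Int × List (Int × Int))) (dd : List Int) : PySem.Dict Int (PySem.Dict Int Int) :=
  pvTab dd (fun a => pvTab (pvFullK dd a) (fun b => pvV pm a b))

-- cell value of B's sweep between outer iterations: outer keys P processed
def pvVal0 (pm : List (Int × List (Int × Int))) (P : List Int) (x y : Int) : Int :=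
  (if x ∈ P then pvV pm x y else 0) - (if y ∈ P then pvV pm y x else 0)

-- cell value of B's sweep inside outer key a, inner partners E processed
def pvValE (pm : List (Int × List (Int × Int))) (P : List Int) (a : Int) (E : List Int) (x y : Int) : Int :=
  (if x ∈ P ∨ (x = a ∧ y ∈ E) then pvV pm x y else 0)
  - (if y ∈ P ∨ (y = a ∧ x ∈ E) then pvV pm y x else 0)

def pvSt0 (pm : List (Int × List (Int × Int))) (dd P : List Int) : PySem.Dict Int (PySem.Dict Int Int) :=
  pvTab dd (fun x => pvTab (pvFullK dd x) (fun y => pvVal0 pm P x y))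

def pvStE (pm : List (Int × List (Int × Int))) (dd P : List Int) (a : Int) (E : List Int) : PySem.Dict Int (PySem.Dict Int Int) :=
  pvTab dd (fun x => pvTab (pvFullK dd x) (fun y => pvValE pm P a E x y))

-- B's sweep step for forward cell (a, b)
def pvStep (pm : List (Int × List (Int × Int))) (a b : Int)
    (m : PySem.Dict Int (PySem.Dict Int Int)) : PySem.Dict Int (PySem.Dict Int Int) :=
  ((m.modify a PySem.Dict.empty (fun row => row.insert b (row.getD b 0 + pvV pm a b))).modify b
    PySem.Dict.empty (fun row => row.insert a (row.getD a 0 - pvV pm a b)))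

theorem get?_pvTab {ν : Type} (K : List Int) (r : Int → ν) (k : Int) (h : k ∈ K) :
    (pvTab K r).get? k = some (r k) := by
  induction K with
  | nil => simp at h
  | cons x K ih =>
    show (PySem.Dict.mk ((x, r x) :: K.map (fun y => (y, r y)))).get? k = some (r k)
    rw [PySem.Dict.get?_mk_cons]
    by_cases hxk : x = k
    · subst hxk; simp
    · have hk : k ∈ K := by
        rcases List.mem_cons.mp h with h1 | h1
        · exact absurd h1.symm hxk
        · exact h1
      simpa [hxk] using ih hk

theorem contains_pvTab {ν : Type} (K : List Int) (r : Int → ν) (k : Int) :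
    (pvTab K r).contains k = decide (k ∈ K) := by
  induction K with
  | nil => rfl
  | cons x K ih =>
    show ((x == k) || (pvTab K r).contains k) = decide (k ∈ x :: K)
    by_cases h : x = k
    · subst h; simp
    · simp [h, Ne.symm h, ih]

theorem getD_pvTab {ν : Type} (K : List Int) (r : Int → ν) (k : Int) (d : ν) (h : k ∈ K) :
    (pvTab K r).getD k d = r k := by
  rw [PySem.Dict.getD_eq_get?_getD, get?_pvTab K r k h]
  rfl

theorem keys_pvTab {ν : Type} (K : List Int) (r : Int → ν) : (pvTab K r).keys = K := by
  induction K with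
  | nil => rfl
  | cons x K ih =>
    show x :: (pvTab K r).keys = x :: K
    rw [ih]

theorem items_pvTab {ν : Type} (K : List Int) (r : Int → ν) :
    (pvTab K r).items = K.map (fun x => (x, r x)) := rfl

theorem insert_pvTab {ν : Type} (K : List Int) (r : Int → ν) (k : Int) (v : ν) :
    (pvTab K r).insert k v
      = pvTab (if k ∈ K then K else K ++ [k]) (fun x => if x = k then v else r x) := by
  by_cases hk : k ∈ K
  · have hc : (pvTab K r).contains k = true := by rw [contains_pvTab]; simpa
    apply PySem.Dict.ext
    rw [PySem.Dict.items_insert_of_contains _ _ hc]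
    show List.map _ (K.map (fun x => (x, r x))) = List.map _ (if k ∈ K then K else K ++ [k])
    rw [if_pos hk, List.map_map]
    apply List.map_congr_left
    intro x _
    by_cases hxk : x = k
    · subst hxk; simp
    · simp [hxk]
  · have hc : (pvTab K r).contains k = false := by rw [contains_pvTab]; simpa
    apply PySem.Dict.ext
    rw [PySem.Dict.items_insert_of_not_contains _ _ hc]
    show K.map (fun x => (x, r x)) ++ [(k, v)] = List.map _ (if k ∈ K then K else K ++ [k])
    rw [if_neg hk, List.map_append]
    congr 1
    · apply List.map_congr_left
      intro x hx
      have hxk : x ≠ k := fun h => hk (h ▸ hx)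
      simp [hxk]
    · simp

theorem pvTab_congr {ν : Type} (K : List Int) (r r' : Int → ν) (h : ∀ x ∈ K, r x = r' x) :
    pvTab K r = pvTab K r' := by
  apply PySem.Dict.ext
  show K.map _ = K.map _
  apply List.map_congr_left
  intro x hx
  rw [h x hx]

theorem modify_pvTab {ν : Type} (K : List Int) (r : Int → ν) (k : Int) (d : ν) (f : ν → ν)
    (h : k ∈ K) :
    (pvTab K r).modify k d f = pvTab K (fun x => if x = k then f (r x) else r x) := by
  show (pvTab K r).insert k (f ((pvTab K r).getD k d)) = _
  rw [getD_pvTab K r k d h, insert_pvTab, if_pos h]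
  apply pvTab_congr
  intro x _
  by_cases hxk : x = k
  · subst hxk; simp
  · simp [hxk]

theorem modify_insert_self {ν : Type} (m : PySem.Dict Int ν) (a : Int) (r d : ν) (f : ν → ν) :
    (m.insert a r).modify a d f = m.insert a (f r) := by
  show (m.insert a r).insert a (f ((m.insert a r).getD a d)) = _
  rw [PySem.Dict.getD_insert_self, PySem.Dict.insert_insert_self]

theorem foldl_insert_pvTab {ν : Type} (r : Int → ν) :
    ∀ (l : List Int) (S : List Int),
      l.foldl (fun m x => m.insert x (r x)) (pvTab S r) = pvTab (PySem.Set.update S l) r := by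
  intro l
  induction l with
  | nil => intro S; simp [PySem.Set.update]
  | cons a l ih =>
    intro S
    rw [List.foldl_cons, insert_pvTab]
    have hfun : (fun x => if x = a then r a else r x) = r := by
      funext x; by_cases h : x = a <;> simp [h]
    have hadd : (if a ∈ S then S else S ++ [a]) = PySem.Set.add S a := by
      by_cases h : a ∈ S <;> simp [PySem.Set.add, h]
    rw [hfun, hadd, ih, PySem.Set.update_cons]

theorem update_filter_pv (p : Int → Bool) :
    ∀ (l : List Int) (S : List Int),
      (PySem.Set.update S l).filter p = PySem.Set.update (S.filter p) (l.filter p) := by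
  intro l
  induction l with
  | nil => intro S; simp [PySem.Set.update]
  | cons a l ih =>
    intro S
    rw [PySem.Set.update_cons, ih]
    have hstep : (PySem.Set.add S a).filter p
        = if p a then PySem.Set.add (S.filter p) a else S.filter p := by
      by_cases hS : a ∈ S
      · have h1 : PySem.Set.add S a = S := by simp [PySem.Set.add, hS]
        rw [h1]
        by_cases hpa : p a
        · have h2 : a ∈ S.filter p := List.mem_filter.mpr ⟨hS, hpa⟩
          simp [hpa, PySem.Set.add, h2]
        · simp [hpa]
      · have h1 : PySem.Set.add S a = S ++ [a] := by simp [PySem.Set.add, hS]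
        rw [h1, List.filter_append]
        by_cases hpa : p a
        · have h2 : a ∉ S.filter p := fun hmem => hS (List.mem_filter.mp hmem).1
          simp [hpa, PySem.Set.add, h2]
        · simp [hpa]
    rw [hstep, List.filter_cons]
    by_cases hpa : p a
    · rw [if_pos hpa, if_pos hpa, PySem.Set.update_cons]
    · rw [if_neg hpa, if_neg hpa]

theorem pvOfList_filter (p : Int → Bool) (l : List Int) :
    PySem.Set.ofList (l.filter p) = (PySem.Set.ofList l).filter p := by
  have h := update_filter_pv p l []
  simp only [List.filter_nil] at h
  rw [PySem.Set.update_nil_left, PySem.Set.update_nil_left] at h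
  exact h.symm

theorem nodup_pvFullK (dd : List Int) (x : Int) (h : dd.Nodup) : (pvFullK dd x).Nodup :=
  h.filter _

theorem mem_pvFullK (dd : List Int) (x y : Int) :
    y ∈ pvFullK dd x ↔ y ∈ dd ∧ y ≠ x := by
  unfold pvFullK
  simp [List.mem_filter]

-- === A: nested loops to tabulated form ===

theorem A_inner (a : Int) (w : Int → Int) :
    ∀ (l : List Int) (m : PySem.Dict Int (PySem.Dict Int Int)) (r : PySem.Dict Int Int),
      l.foldl
        (fun m b =>
          if a ≠ b then m.modify a PySem.Dict.empty (fun row => row.insert b (w b)) else m)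
        (m.insert a r)
      = m.insert a (l.foldl (fun row b => if a ≠ b then row.insert b (w b) else row) r) := by
  intro l
  induction l with
  | nil => intro m r; rfl
  | cons b l ih =>
    intro m r
    rw [List.foldl_cons, List.foldl_cons]
    by_cases hab : a ≠ b
    · rw [if_pos hab, if_pos hab, modify_insert_self]
      exact ih m (r.insert b (w b))
    · rw [if_neg hab, if_neg hab]
      exact ih m r

theorem foldl_guard_insert_A (a : Int) (w : Int → Int) :
    ∀ (l : List Int) (r0 : PySem.Dict Int Int),
      l.foldl (fun row b => if a ≠ b then row.insert b (w b) else row) r0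
        = (l.filter (fun b => !(b == a))).foldl
            (fun row b => row.insert b (w b)) r0 := by
  intro l
  induction l with
  | nil => intro r0; rfl
  | cons b l ih =>
    intro r0
    rw [List.foldl_cons, List.filter_cons]
    by_cases h : a = b
    · rw [if_neg (fun hh => hh h), if_neg (by simp [h])]
      exact ih r0
    · rw [if_pos h, if_pos (by simp; exact fun hh => h hh.symm), List.foldl_cons]
      exact ih (r0.insert b (w b))

theorem foldl_guard_insert_B (a : Int) (w : Int → Int) :
    ∀ (l : List Int) (r0 : PySem.Dict Int Int),
      l.foldl (fun row b => if b ≠ a then row.insert b (w b) else row) r0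
        = (l.filter (fun b => !(b == a))).foldl
            (fun row b => row.insert b (w b)) r0 := by
  intro l
  induction l with
  | nil => intro r0; rfl
  | cons b l ih =>
    intro r0
    rw [List.foldl_cons, List.filter_cons]
    by_cases h : b = a
    · rw [if_neg (fun hh => hh h), if_neg (by simp [h])]
      exact ih r0
    · rw [if_pos h, if_pos (by simpa using h), List.foldl_cons]
      exact ih (r0.insert b (w b))

theorem filter_fold_tab (w : Int → Int) (cands : List Int) (a : Int) :
    (cands.filter (fun b => !(b == a))).foldl (fun row b => row.insert b (w b)) PySem.Dict.empty
      = pvTab (pvFullK (PySem.Set.ofList cands) a) w := by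
  have he : (PySem.Dict.empty : PySem.Dict Int Int) = pvTab ([] : List Int) w := rfl
  rw [he, foldl_insert_pvTab, PySem.Set.update_nil_left, pvOfList_filter]
  rfl

theorem rowA_eq (pm : List (Int × List (Int × Int))) (cands : List Int) (a : Int) :
    cands.foldl (fun row b => if a ≠ b then row.insert b (pvMarg pm a b) else row)
        PySem.Dict.empty
      = pvTab (pvFullK (PySem.Set.ofList cands) a) (fun b => pvMarg pm a b) := by
  rw [foldl_guard_insert_A, filter_fold_tab]

theorem A_eq_pvM (pm : List (Int × List (Int × Int))) (cands : List Int) :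
    compute_margin_matrix pm cands
      = (pvM pm (PySem.Set.ofList cands)).items.map (fun p => (p.1, p.2.items)) := by
  unfold compute_margin_matrix
  have hF : (fun (m : PySem.Dict Int (PySem.Dict Int Int)) (a : Int) =>
        cands.foldl
          (fun m b =>
            if a ≠ b then
              let votes_a := (PySem.Dict.mk ((PySem.Dict.mk pm).getD a [])).getD b 0
              let votes_b := (PySem.Dict.mk ((PySem.Dict.mk pm).getD b [])).getD a 0
              m.modify a PySem.Dict.empty (fun row => row.insert b (votes_a - votes_b))
            else m)
          (m.insert a PySem.Dict.empty))
      = (fun m a => m.insert a (pvTab (pvFullK (PySem.Set.ofList cands) a) (fun b => pvMarg pm a b))) := by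
    funext m a
    exact (A_inner a (fun b => pvMarg pm a b) cands m PySem.Dict.empty).trans
      (congrArg (fun r => m.insert a r) (rowA_eq pm cands a))
  rw [hF]
  have he : (PySem.Dict.empty : PySem.Dict Int (PySem.Dict Int Int))
      = pvTab ([] : List Int)
          (fun a => pvTab (pvFullK (PySem.Set.ofList cands) a) (fun b => pvMarg pm a b)) := rfl
  rw [he, foldl_insert_pvTab, PySem.Set.update_nil_left]
  rfl

-- === B stage 1: forward matrix ===

theorem B_forward (pm : List (Int × List (Int × Int))) (cands : List Int) :
    cands.foldl
      (fun f a =>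
        f.insert a
          (cands.foldl
            (fun r b => if b ≠ a then r.insert b (pvV pm a b) else r)
            PySem.Dict.empty))
      PySem.Dict.empty
    = pvFwd pm (PySem.Set.ofList cands) := by
  have hrow : (fun (a : Int) =>
        cands.foldl (fun r b => if b ≠ a then r.insert b (pvV pm a b) else r) PySem.Dict.empty)
      = (fun a => pvTab (pvFullK (PySem.Set.ofList cands) a) (fun b => pvV pm a b)) := by
    funext a
    rw [foldl_guard_insert_B, filter_fold_tab]
  show cands.foldl (fun f a => f.insert a ((fun (a : Int) =>
        cands.foldl (fun r b => if b ≠ a then r.insert b (pvV pm a b) else r) PySem.Dict.empty) a))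
      PySem.Dict.empty = _
  rw [hrow]
  have he : (PySem.Dict.empty : PySem.Dict Int (PySem.Dict Int Int))
      = pvTab ([] : List Int)
          (fun a => pvTab (pvFullK (PySem.Set.ofList cands) a) (fun b => pvV pm a b)) := rfl
  rw [he, foldl_insert_pvTab, PySem.Set.update_nil_left]
  rfl

-- === B stage 2: zero matrix ===

theorem B_zero (pm : List (Int × List (Int × Int))) (dd : List Int) (hnd : dd.Nodup) :
    (pvFwd pm dd).keys.foldl
      (fun m a =>
        m.insert a
          (((pvFwd pm dd).getD a PySem.Dict.empty).keys.foldl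
            (fun r b => r.insert b (0 : Int)) PySem.Dict.empty))
      PySem.Dict.empty
    = pvSt0 pm dd [] := by
  unfold pvFwd
  rw [keys_pvTab]
  refine Eq.trans (b := dd.foldl
      (fun m a => m.insert a (pvTab (pvFullK dd a) (fun _ => (0 : Int))))
      PySem.Dict.empty) ?_ ?_
  · apply PySem.List.foldl_congr_mem
    intro m a ha
    rw [getD_pvTab _ _ _ _ ha, keys_pvTab]
    have he : (PySem.Dict.empty : PySem.Dict Int Int)
        = pvTab ([] : List Int) (fun _ => (0 : Int)) := rfl
    rw [he, foldl_insert_pvTab, PySem.Set.update_nil_left]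
    congr 1
    exact congrArg (fun K => pvTab K (fun _ => (0 : Int)))
      (PySem.Set.ofList_eq_self_of_nodup _ (nodup_pvFullK dd a hnd))
  · have he : (PySem.Dict.empty : PySem.Dict Int (PySem.Dict Int Int))
        = pvTab ([] : List Int) (fun a => pvTab (pvFullK dd a) (fun _ => (0 : Int))) := rfl
    rw [he, foldl_insert_pvTab, PySem.Set.update_nil_left]
    refine Eq.trans (congrArg (fun K => pvTab K
        (fun a => pvTab (pvFullK dd a) (fun _ => (0 : Int))))
        (PySem.Set.ofList_eq_self_of_nodup dd hnd)) ?_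
    unfold pvSt0
    apply pvTab_congr
    intro x _
    apply pvTab_congr
    intro y _
    simp [pvVal0]

-- === B stage 3: the sweep ===

theorem pvStep_eq (pm : List (Int × List (Int × Int))) (dd P E : List Int) (a b : Int)
    (_hnd : dd.Nodup) (ha : a ∈ dd) (haP : a ∉ P) (hb : b ∈ pvFullK dd a) (hbE : b ∉ E) :
    pvStep pm a b (pvStE pm dd P a E) = pvStE pm dd P a (E ++ [b]) := by
  obtain ⟨hbdd, hba⟩ := (mem_pvFullK dd a b).mp hb
  have hab : a ≠ b := fun h => hba h.symm
  have haKb : a ∈ pvFullK dd b := (mem_pvFullK dd b a).mpr ⟨ha, hab⟩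
  unfold pvStep pvStE
  rw [modify_pvTab _ _ _ _ _ ha, modify_pvTab _ _ _ _ _ hbdd]
  apply pvTab_congr
  intro x hx
  by_cases hxb : x = b
  · subst hxb
    rw [if_pos rfl, if_neg (fun h => hba h)]
    rw [getD_pvTab _ _ _ _ haKb, insert_pvTab, if_pos haKb]
    apply pvTab_congr
    intro y hy
    obtain ⟨hydd, hyx⟩ := (mem_pvFullK dd x y).mp hy
    by_cases hya : y = a
    · subst hya
      rw [if_pos rfl]
      simp only [pvValE]
      by_cases hxP : x ∈ P <;>
        simp [hxP, haP, hbE, hab, List.mem_append]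
    · rw [if_neg hya]
      simp only [pvValE]
      have h2 : y ∈ E ++ [x] ↔ y ∈ E := by
        simp [List.mem_append]
        intro h; exact absurd h hyx
      by_cases hyE : y ∈ E <;> by_cases hxP : x ∈ P <;> by_cases hyP : y ∈ P <;>
        simp [hyE, hxP, hyP, hya, h2, List.mem_append]
  · rw [if_neg hxb]
    by_cases hxa : x = a
    · subst hxa
      rw [if_pos rfl, getD_pvTab _ _ _ _ hb, insert_pvTab, if_pos hb]
      apply pvTab_congr
      intro y hy
      obtain ⟨hydd, hyx⟩ := (mem_pvFullK dd x y).mp hy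
      by_cases hyb : y = b
      · subst hyb
        rw [if_pos rfl]
        simp only [pvValE]
        by_cases hyP : y ∈ P <;>
          simp [haP, hbE, hyP, fun h => hba h, List.mem_append] <;> ring
      · rw [if_neg hyb]
        simp only [pvValE]
        have h2 : y ∈ E ++ [b] ↔ y ∈ E := by
          simp [List.mem_append]
          intro h; exact absurd h hyb
        by_cases hyE : y ∈ E <;> by_cases hyP : y ∈ P <;>
          simp [hyE, hyP, hyx, h2, haP, List.mem_append]
    · rw [if_neg hxa]
      apply pvTab_congr
      intro y hy
      obtain ⟨hydd, hyx⟩ := (mem_pvFullK dd x y).mp hy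
      simp only [pvValE]
      have h2 : x ∈ E ++ [b] ↔ x ∈ E := by
        simp [List.mem_append]
        intro h; exact absurd h hxb
      have h3 : y ∈ E ++ [b] ↔ y ∈ E ∨ y = b := by simp [List.mem_append]
      by_cases hya : y = a <;> by_cases hxP : x ∈ P <;> by_cases hyP : y ∈ P <;>
        simp [hya, hxP, hyP, hxa, h2, h3, List.mem_append]

theorem inner_sweep (pm : List (Int × List (Int × Int))) (dd P : List Int) (a : Int)
    (hnd : dd.Nodup) (ha : a ∈ dd) (haP : a ∉ P) :
    ∀ (s E : List Int), pvFullK dd a = E ++ s →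
      s.foldl (fun m b => pvStep pm a b m) (pvStE pm dd P a E) = pvStE pm dd P a (E ++ s) := by
  intro s
  induction s with
  | nil => intro E _; simp
  | cons b s ih =>
    intro E hdec
    have hb : b ∈ pvFullK dd a := by rw [hdec]; simp
    have hbE : b ∉ E := by
      have hK : (pvFullK dd a).Nodup := nodup_pvFullK dd a hnd
      rw [hdec] at hK
      have := (List.nodup_append.mp hK).2.2
      intro hbE'
      exact this b hbE' b (by simp) rfl
    rw [List.foldl_cons, pvStep_eq pm dd P E a b hnd ha haP hb hbE]
    have := ih (E ++ [b]) (by rw [hdec]; simp)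
    simpa using this

theorem stE_nil (pm : List (Int × List (Int × Int))) (dd P : List Int) (a : Int) :
    pvSt0 pm dd P = pvStE pm dd P a [] := by
  unfold pvSt0 pvStE
  apply pvTab_congr
  intro x _
  apply pvTab_congr
  intro y _
  simp [pvVal0, pvValE]

theorem stE_full (pm : List (Int × List (Int × Int))) (dd P : List Int) (a : Int)
    (ha : a ∈ dd) :
    pvStE pm dd P a (pvFullK dd a) = pvSt0 pm dd (P ++ [a]) := by
  unfold pvStE pvSt0
  apply pvTab_congr
  intro x hx
  apply pvTab_congr
  intro y hy
  obtain ⟨hydd, hyx⟩ := (mem_pvFullK dd x y).mp hy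
  simp only [pvValE, pvVal0]
  have h1 : (x ∈ P ∨ (x = a ∧ y ∈ pvFullK dd a)) ↔ x ∈ P ++ [a] := by
    constructor
    · rintro (h | ⟨rfl, _⟩)
      · exact List.mem_append_left _ h
      · exact List.mem_append_right _ (by simp)
    · intro h
      rcases List.mem_append.mp h with h | h
      · exact Or.inl h
      · simp at h
        subst h
        exact Or.inr ⟨rfl, (mem_pvFullK dd x y).mpr ⟨hydd, hyx⟩⟩
  have h2 : (y ∈ P ∨ (y = a ∧ x ∈ pvFullK dd a)) ↔ y ∈ P ++ [a] := by
    constructor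
    · rintro (h | ⟨rfl, _⟩)
      · exact List.mem_append_left _ h
      · exact List.mem_append_right _ (by simp)
    · intro h
      rcases List.mem_append.mp h with h | h
      · exact Or.inl h
      · simp at h
        subst h
        exact Or.inr ⟨rfl, (mem_pvFullK dd y x).mpr ⟨hx, fun hh => hyx hh.symm⟩⟩
  rw [if_congr h1 rfl rfl, if_congr h2 rfl rfl]

theorem outer_sweep (pm : List (Int × List (Int × Int))) (dd : List Int) (hnd : dd.Nodup) :
    ∀ (s P : List Int), dd = P ++ s →
      s.foldl (fun m a => (pvFullK dd a).foldl (fun m b => pvStep pm a b m) m)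
        (pvSt0 pm dd P)
      = pvSt0 pm dd dd := by
  intro s
  induction s with
  | nil => intro P h; rw [h]; simp
  | cons a s ih =>
    intro P hdec
    have ha : a ∈ dd := by rw [hdec]; simp
    have haP : a ∉ P := by
      rw [hdec] at hnd
      have := (List.nodup_append.mp hnd).2.2
      intro haP'
      exact this a haP' a (by simp) rfl
    rw [List.foldl_cons, stE_nil pm dd P a,
      inner_sweep pm dd P a hnd ha haP (pvFullK dd a) [] (by simp)]
    have h1 : ([] : List Int) ++ pvFullK dd a = pvFullK dd a := by simp
    rw [h1, stE_full pm dd P a ha]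
    exact ih (P ++ [a]) (by rw [hdec]; simp)

theorem st0_full (pm : List (Int × List (Int × Int))) (dd : List Int) :
    pvSt0 pm dd dd = pvM pm dd := by
  unfold pvSt0 pvM
  apply pvTab_congr
  intro x hx
  apply pvTab_congr
  intro y hy
  obtain ⟨hydd, _⟩ := (mem_pvFullK dd x y).mp hy
  simp [pvVal0, pvMarg, hx, hydd]

theorem B_eq_pvM (pm : List (Int × List (Int × Int))) (cands : List Int) :
    compute_margin_matrix_alt pm cands
      = (pvM pm (PySem.Set.ofList cands)).items.map (fun p => (p.1, p.2.items)) := by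
  simp only [compute_margin_matrix_alt]
  have hfwd : (cands.foldl
      (fun f a =>
        f.insert a
          (cands.foldl
            (fun r b =>
              if b ≠ a then
                r.insert b ((PySem.Dict.mk ((PySem.Dict.mk pm).getD a [])).getD b 0)
              else r)
            PySem.Dict.empty))
      PySem.Dict.empty) = pvFwd pm (PySem.Set.ofList cands) := B_forward pm cands
  rw [hfwd, B_zero pm (PySem.Set.ofList cands) (PySem.Set.nodup_ofList cands)]
  have hsweep :
      (pvFwd pm (PySem.Set.ofList cands)).items.foldl
        (fun m p =>
          p.2.items.foldl
            (fun m q =>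
              let m1 := m.modify p.1 PySem.Dict.empty (fun row => row.insert q.1 (row.getD q.1 0 + q.2))
              m1.modify q.1 PySem.Dict.empty (fun row => row.insert p.1 (row.getD p.1 0 - q.2)))
            m)
        (pvSt0 pm (PySem.Set.ofList cands) [])
      = pvSt0 pm (PySem.Set.ofList cands) (PySem.Set.ofList cands) := by
    unfold pvFwd
    rw [items_pvTab, List.foldl_map]
    have h1 : (fun (m : PySem.Dict Int (PySem.Dict Int Int)) (a : Int) =>
          (pvTab (pvFullK (PySem.Set.ofList cands) a) (fun b => pvV pm a b)).items.foldl
            (fun m q =>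
              let m1 := m.modify a PySem.Dict.empty (fun row => row.insert q.1 (row.getD q.1 0 + q.2))
              m1.modify q.1 PySem.Dict.empty (fun row => row.insert a (row.getD a 0 - q.2)))
            m)
        = (fun m a => (pvFullK (PySem.Set.ofList cands) a).foldl (fun m b => pvStep pm a b m) m) := by
      funext m a
      rw [items_pvTab, List.foldl_map]
      rfl
    rw [h1]
    exact outer_sweep pm (PySem.Set.ofList cands) (PySem.Set.nodup_ofList cands) (PySem.Set.ofList cands) [] (by simp)
  rw [hsweep, st0_full]

-- ===== VERDICT (by name: the statement is the Claim_ definition above) =====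
theorem compute_margin_matrix_spec : Claim_equal_compute_margin_matrix := by
  intro pm cands _dom _pre
  unfold Spec_compute_margin_matrix
  rw [A_eq_pvM, B_eq_pvM]
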